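-- pv_equiv track=rewrite | github.com/belgrades/spark-fswm | src/distributed_fswm.py | jukes_cantor
-- ===== SOURCE A (Python) =====
-- idx = lambda p, s: ((~(p ^ (0b11 << (2 * s))) & (0b11 << (2 * s))) >> (2 * s))
--
-- def jukes_cantor(w0, w1, m, k):
--     score = 0
--
--     # Calculate the don't care mask.
--     dont_care_mask = (m ^ ((0b1 << (2 * k)) - 1))
--
--     for i in range(k):
--         if idx(dont_care_mask, i) == 0b11:
--             if not idx(w0, i) == idx(w1, i):
--                 score += 1
--
--     return score
-- ===== SOURCE B (Python) =====
-- def jukes_cantor(w0, w1, m, k):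
--     # Bit-parallel: one pass of big-int ops + a popcount instead of a per-position loop.
--     full = (1 << (2 * k)) - 1                 # low 2k bits
--     low = full // 3                           # 0b0101...01: one flag bit per 2-bit group
--     diff = (w0 ^ w1) & full
--     dflag = (diff | (diff >> 1)) & low        # group mismatch flags
--     mm = m & full
--     sel = ((mm | (mm >> 1)) & low) ^ low      # groups where m's 2 bits are both 0
--     return (dflag & sel).bit_count()
-- ===== Notes on version B (the rewrite author's own statement) =====
-- stated objective: faster
-- what changed: Replaced the per-position loop (which rebuilds the 2-bit extraction mask and shifts for every index) with a constant number of whole-word big-int bitwise operations: collapse each 2-bit group of w0^w1 to one mismatch flag, select the groups where the mask's two bits are zero, and popcount the result.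
import Mathlib
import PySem

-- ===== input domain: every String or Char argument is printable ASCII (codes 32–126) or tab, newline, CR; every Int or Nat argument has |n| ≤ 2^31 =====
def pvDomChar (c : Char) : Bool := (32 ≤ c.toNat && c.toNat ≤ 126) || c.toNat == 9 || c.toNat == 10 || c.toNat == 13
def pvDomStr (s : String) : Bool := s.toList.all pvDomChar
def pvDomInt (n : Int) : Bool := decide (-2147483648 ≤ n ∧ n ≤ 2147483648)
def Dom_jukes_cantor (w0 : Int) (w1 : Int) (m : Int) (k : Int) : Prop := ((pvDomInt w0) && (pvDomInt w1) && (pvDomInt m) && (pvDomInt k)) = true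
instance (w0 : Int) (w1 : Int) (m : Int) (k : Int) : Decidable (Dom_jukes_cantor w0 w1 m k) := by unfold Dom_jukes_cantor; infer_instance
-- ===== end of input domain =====

-- B replaces A's per-position loop by a constant number of whole-word bitwise
-- operations plus one popcount (objective: faster).

-- ===== PORT A =====
-- idx = lambda p, s: ((~(p ^ (0b11 << (2*s))) & (0b11 << (2*s))) >> (2*s))
def pvIdx (p : Int) (s : Nat) : Int :=
  (PySem.Int.band (Int.not (PySem.Int.bxor p ((3 : Int) <<< (2 * s)))) ((3 : Int) <<< (2 * s))) >>> (2 * s)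

def jukes_cantor (w0 : Int) (w1 : Int) (m : Int) (k : Int) : Int :=
  let dont_care_mask := PySem.Int.bxor m (((1 : Int) <<< (2 * k).toNat) - 1)
  (List.range k.toNat).foldl
    (fun score i =>
      if pvIdx dont_care_mask i = 3 then
        if ¬ (pvIdx w0 i = pvIdx w1 i) then score + 1 else score
      else score)
    0

-- ===== PORT B =====
def jukes_cantor_alt (w0 : Int) (w1 : Int) (m : Int) (k : Int) : Int :=
  let full := ((1 : Int) <<< (2 * k).toNat) - 1
  let low := PySem.Int.floordiv full 3
  let diff := PySem.Int.band (PySem.Int.bxor w0 w1) full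
  let dflag := PySem.Int.band (PySem.Int.bor diff (diff >>> (1 : Nat))) low
  let mm := PySem.Int.band m full
  let sel := PySem.Int.bxor (PySem.Int.band (PySem.Int.bor mm (mm >>> (1 : Nat))) low) low
  ((PySem.Int.bitCount (PySem.Int.band dflag sel) : Nat) : Int)

-- ===== PRECONDITION & SPEC =====
-- Python raises ValueError ("negative shift count") for k < 0, in A and in B alike.
def Pre_jukes_cantor (w0 : Int) (w1 : Int) (m : Int) (k : Int) : Prop := 0 ≤ k
instance (w0 : Int) (w1 : Int) (m : Int) (k : Int) : Decidable (Pre_jukes_cantor w0 w1 m k) := by unfold Pre_jukes_cantor; infer_instance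
def pvWitness_jukes_cantor : Int × Int × Int × Int := (5, 9, 2, 3)

def Spec_jukes_cantor (w0 : Int) (w1 : Int) (m : Int) (k : Int) (out : Int) : Prop := out = jukes_cantor_alt w0 w1 m k
instance (w0 : Int) (w1 : Int) (m : Int) (k : Int) (out : Int) : Decidable (Spec_jukes_cantor w0 w1 m k out) := by unfold Spec_jukes_cantor; infer_instance

-- ===== CLAIM (what is proved, stated in full; the proofs are below) =====
def Claim_equal_jukes_cantor : Prop := ∀ (w0 : Int) (w1 : Int) (m : Int) (k : Int), Dom_jukes_cantor w0 w1 m k → Pre_jukes_cantor w0 w1 m k → Spec_jukes_cantor w0 w1 m k (jukes_cantor w0 w1 m k)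

-- ===== LEMMAS AND PROOFS =====

-- ---- bridging PySem bitwise ops to Mathlib's Int.land/lor/xor/lnot ----

theorem pv_ldiff_add_and (m n : Nat) : Nat.ldiff m n + (m &&& n) = m := by
  induction m using Nat.binaryRec generalizing n with
  | zero =>
      have h1 : Nat.ldiff 0 n = 0 := by
        apply Nat.eq_of_testBit_eq; intro i
        simp [Nat.testBit_ldiff, Nat.zero_testBit]
      simp [h1]
  | bit b m ih =>
      rw [← Nat.bit_testBit_zero_shiftRight_one n, Nat.ldiff_bit, Nat.land_bit]
      simp only [Nat.bit_val]
      have := ih (n >>> 1)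
      cases b <;> cases n.testBit 0 <;> simp <;> omega

theorem pv_sub_and (m n : Nat) : m - (m &&& n) = Nat.ldiff m n := by
  have := pv_ldiff_add_and m n; omega

theorem pv_negSucc_aux (y : Nat) : (-(Int.negSucc y) - 1) = (y : Int) := by
  simp [Int.negSucc_eq]

theorem pv_toNat_aux (y : Nat) : (- -((y : Int) + 1) - 1).toNat = y := by omega

theorem pv_band_eq_land (a b : Int) : PySem.Int.band a b = Int.land a b := by
  cases a <;> cases b <;>
      simp only [PySem.Int.band, Int.land, Int.ofNat_eq_natCast, Int.negSucc_eq,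
        Int.toNat_natCast, pv_negSucc_aux, pv_toNat_aux, pv_sub_and] <;>
    split_ifs <;> push_cast <;> omega

theorem pv_bor_eq_lor (a b : Int) : PySem.Int.bor a b = Int.lor a b := by
  cases a <;> cases b <;>
      simp only [PySem.Int.bor, Int.lor, Int.ofNat_eq_natCast, Int.negSucc_eq,
        Int.toNat_natCast, pv_negSucc_aux, pv_toNat_aux, pv_sub_and] <;>
    split_ifs <;> push_cast <;> omega

theorem pv_bxor_eq_xor (a b : Int) : PySem.Int.bxor a b = Int.xor a b := by
  cases a <;> cases b <;>
      simp only [PySem.Int.bxor, Int.xor, Int.ofNat_eq_natCast, Int.negSucc_eq,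
        Int.toNat_natCast, pv_negSucc_aux, pv_toNat_aux, pv_sub_and] <;>
    split_ifs <;> push_cast <;> omega

theorem pv_not_eq_lnot (a : Int) : Int.not a = Int.lnot a := by
  cases a <;> rfl

-- ---- testBit lemmas ----

theorem pv_tb_band (a b : Int) (i : Nat) :
    (PySem.Int.band a b).testBit i = (a.testBit i && b.testBit i) := by
  rw [pv_band_eq_land, Int.testBit_land]

theorem pv_tb_bor (a b : Int) (i : Nat) :
    (PySem.Int.bor a b).testBit i = (a.testBit i || b.testBit i) := by
  rw [pv_bor_eq_lor, Int.testBit_lor]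

theorem pv_tb_bxor (a b : Int) (i : Nat) :
    (PySem.Int.bxor a b).testBit i = (a.testBit i ^^ b.testBit i) := by
  rw [pv_bxor_eq_xor, Int.testBit_lxor]

theorem pv_tb_not (a : Int) (i : Nat) :
    (Int.not a).testBit i = !(a.testBit i) := by
  rw [pv_not_eq_lnot, Int.testBit_lnot]

theorem pv_tb_natCast (n : Nat) (i : Nat) : ((n : Int)).testBit i = n.testBit i := rfl

theorem pv_shr_natCast (m n : Nat) : ((m : Int) >>> n) = ((m >>> n : Nat) : Int) := rfl

theorem pv_tb_shiftRight (a : Int) (n i : Nat) :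
    (a >>> n).testBit i = a.testBit (n + i) := by
  cases a with
  | ofNat x =>
      show ((x >>> n : Nat) : Int).testBit i = _
      rw [pv_tb_natCast, Nat.testBit_shiftRight]; rfl
  | negSucc x =>
      show (Int.negSucc (x >>> n)).testBit i = _
      show (!(x >>> n).testBit i) = (!x.testBit (n + i))
      rw [Nat.testBit_shiftRight]

theorem pv_tb_three_shl (j i : Nat) :
    (((3 : Int) <<< j)).testBit i = (decide (j ≤ i) && decide (i < j + 2)) := by
  have h : ((3 : Int) <<< j) = ((3 <<< j : Nat) : Int) := rfl
  rw [h, pv_tb_natCast, Nat.testBit_shiftLeft]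
  have h3 : ∀ x, Nat.testBit 3 x = decide (x < 2) := by
    intro x
    have e : (3 : Nat) = 2 ^ 2 - 1 := rfl
    rw [e, Nat.testBit_two_pow_sub_one]
  rw [h3]
  by_cases h1 : j ≤ i
  · simp only [ge_iff_le, h1, decide_true, Bool.true_and]
    rw [decide_eq_decide]; omega
  · simp only [ge_iff_le, h1, decide_false, Bool.false_and]

theorem pv_tb_full (n i : Nat) :
    ((((1 : Int) <<< n) - 1)).testBit i = decide (i < n) := by
  have h1 : ((1 : Int) <<< n) = ((2 ^ n : Nat) : Int) := by
    show ((1 <<< n : Nat) : Int) = _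
    rw [Nat.one_shiftLeft]
  have h2 : (((2 ^ n : Nat) : Int)) - 1 = ((2 ^ n - 1 : Nat) : Int) := by
    have : 1 ≤ 2 ^ n := Nat.one_le_two_pow
    push_cast [this]; ring
  rw [h1, h2, pv_tb_natCast, Nat.testBit_two_pow_sub_one]

-- ---- the 2-bit group extracted by A's idx ----

def pvVal2 (b0 b1 : Bool) : Nat := b1.toNat * 2 + b0.toNat

theorem pv_testBit_val2 (b0 b1 : Bool) (j : Nat) :
    (pvVal2 b0 b1).testBit j = (if j = 0 then b0 else if j = 1 then b1 else false) := by
  match j with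
  | 0 => cases b0 <;> cases b1 <;> decide
  | 1 => cases b0 <;> cases b1 <;> decide
  | (j + 2) =>
      have hlt : pvVal2 b0 b1 < 2 ^ (j + 2) := by
        have : pvVal2 b0 b1 < 4 := by cases b0 <;> cases b1 <;> decide
        have h4 : (4 : Nat) ≤ 2 ^ (j + 2) := by
          have := Nat.pow_le_pow_right (show 0 < 2 by decide) (show 2 ≤ j + 2 by omega)
          simpa using this
        omega
      rw [Nat.testBit_eq_false_of_lt hlt]
      simp

theorem pv_idx_eq_val2 (p : Int) (s : Nat) :
    pvIdx p s = ((pvVal2 (p.testBit (2 * s)) (p.testBit (2 * s + 1)) : Nat) : Int) := by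
  have hM : (0 : Int) ≤ ((3 : Int) <<< (2 * s)) := by
    show (0 : Int) ≤ ((3 <<< (2 * s) : Nat) : Int)
    exact Int.natCast_nonneg _
  have hnn : (0 : Int) ≤ PySem.Int.band (Int.not (PySem.Int.bxor p ((3 : Int) <<< (2 * s)))) ((3 : Int) <<< (2 * s)) := by
    rw [PySem.Int.band_comm]
    exact PySem.Int.band_nonneg_of_nonneg_left _ hM
  set z := (PySem.Int.band (Int.not (PySem.Int.bxor p ((3 : Int) <<< (2 * s)))) ((3 : Int) <<< (2 * s))).toNat with hz
  have hzz : ((z : Nat) : Int) = PySem.Int.band (Int.not (PySem.Int.bxor p ((3 : Int) <<< (2 * s)))) ((3 : Int) <<< (2 * s)) :=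
    Int.toNat_of_nonneg hnn
  have hzbit : ∀ i, z.testBit i = (!(p.testBit i ^^ (decide (2 * s ≤ i) && decide (i < 2 * s + 2))) && (decide (2 * s ≤ i) && decide (i < 2 * s + 2))) := by
    intro i
    rw [← pv_tb_natCast z i, hzz, pv_tb_band, pv_tb_not, pv_tb_bxor, pv_tb_three_shl]
  unfold pvIdx
  rw [← hzz, pv_shr_natCast]
  congr 1
  apply Nat.eq_of_testBit_eq
  intro i
  rw [Nat.testBit_shiftRight, hzbit, pv_testBit_val2]
  match i with
  | 0 =>
      have h1 : decide (2 * s ≤ 2 * s + 0) = true := by simp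
      have h2 : decide (2 * s + 0 < 2 * s + 2) = true := by simp
      rw [h1, h2]
      cases p.testBit (2 * s + 0) <;> simp
  | 1 =>
      have h1 : decide (2 * s ≤ 2 * s + 1) = true := by simp
      have h2 : decide (2 * s + 1 < 2 * s + 2) = true := by simp
      rw [h1, h2]
      cases p.testBit (2 * s + 1) <;> simp
  | (i + 2) =>
      have h2 : decide (2 * s + (i + 2) < 2 * s + 2) = false := by
        rw [decide_eq_false_iff_not]; omega
      rw [h2]
      simp

theorem pv_idx_eq_iff (p q : Int) (s : Nat) :
    (pvIdx p s = pvIdx q s) ↔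
      (p.testBit (2 * s) = q.testBit (2 * s) ∧ p.testBit (2 * s + 1) = q.testBit (2 * s + 1)) := by
  rw [pv_idx_eq_val2, pv_idx_eq_val2, Int.natCast_inj]
  cases hp0 : p.testBit (2 * s) <;> cases hp1 : p.testBit (2 * s + 1) <;>
    cases hq0 : q.testBit (2 * s) <;> cases hq1 : q.testBit (2 * s + 1) <;>
      simp [pvVal2]

theorem pv_idx_eq_three_iff (p : Int) (s : Nat) :
    (pvIdx p s = 3) ↔ (p.testBit (2 * s) = true ∧ p.testBit (2 * s + 1) = true) := by
  rw [pv_idx_eq_val2]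
  cases hp0 : p.testBit (2 * s) <;> cases hp1 : p.testBit (2 * s + 1) <;>
    simp [pvVal2] <;> decide

-- ---- A's loop as a sum of indicators ----

theorem pv_foldl_count (P Q : Nat → Prop) [DecidablePred P] [DecidablePred Q]
    (n : Nat) (c : Int) :
    (List.range n).foldl
        (fun score i => if P i then (if ¬ Q i then score + 1 else score) else score) c
      = c + ∑ i ∈ Finset.range n, (if P i ∧ ¬ Q i then (1 : Int) else 0) := by
  induction n generalizing c with
  | zero => simp
  | succ n ih =>
      rw [List.range_succ, List.foldl_append, ih, Finset.sum_range_succ]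
      by_cases hP : P n <;> by_cases hQ : Q n <;> simp [hP, hQ] <;> ring

-- ---- the bits of LOW = (4^K - 1) / 3 ----

theorem pv_three_mul_L (K : Nat) : 3 * ((4 ^ K - 1) / 3) = 4 ^ K - 1 := by
  have hdvd : 3 ∣ 4 ^ K - 1 := by
    induction K with
    | zero => decide
    | succ K ih =>
        have h1 : 1 ≤ (4 : Nat) ^ K := Nat.one_le_pow _ _ (by decide)
        have h2 : (4 : Nat) ^ (K + 1) = 4 * 4 ^ K := by rw [pow_succ]; ring
        omega
  omega

theorem pv_L_bits (K : Nat) :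
    ∀ j, ((4 ^ K - 1) / 3).testBit j = (decide (j < 2 * K) && decide (j % 2 = 0)) := by
  induction K with
  | zero =>
      intro j
      simp
  | succ K ih =>
      have h1 : 1 ≤ (4 : Nat) ^ K := Nat.one_le_pow _ _ (by decide)
      have h2 : (4 : Nat) ^ (K + 1) = 4 * 4 ^ K := by rw [pow_succ]; ring
      have hK := pv_three_mul_L K
      have hK1 := pv_three_mul_L (K + 1)
      have hstep : (4 ^ (K + 1) - 1) / 3 = 4 * ((4 ^ K - 1) / 3) + 1 := by omega
      intro j
      rw [hstep]
      set L := (4 ^ K - 1) / 3 with hL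
      match j with
      | 0 =>
          rw [Nat.testBit_zero]
          have : (4 * L + 1) % 2 = 1 := by omega
          simp [this]
      | 1 =>
          rw [Nat.testBit_add_one]
          have : (4 * L + 1) / 2 = 2 * L := by omega
          rw [this, Nat.testBit_zero]
          have : (2 * L) % 2 = 0 := by omega
          simp [this]
      | (j + 2) =>
          rw [Nat.testBit_add_one]
          have e1 : (4 * L + 1) / 2 = 2 * L := by omega
          rw [e1, Nat.testBit_add_one]
          have e2 : (2 * L) / 2 = L := by omega
          rw [e2, ih j]
          have e3 : (j + 2) % 2 = j % 2 := by omega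
          have e4 : decide (j + 2 < 2 * (K + 1)) = decide (j < 2 * K) := by
            rw [decide_eq_decide]; omega
          rw [e3, e4]

-- ---- popcount of a nonnegative number as a sum of its bits ----

theorem pv_bitCount_sum (fuel : Nat) :
    ∀ N : Nat, N < 2 ^ fuel →
      PySem.Int.bitCount (N : Int) = ∑ i ∈ Finset.range fuel, (N.testBit i).toNat := by
  induction fuel with
  | zero =>
      intro N hN
      have : N = 0 := by simpa using hN
      subst this
      simpa using PySem.Int.bitCount_zero
  | succ fuel ih =>
      intro N hN
      by_cases h0 : N = 0
      · subst h0
        simp [Nat.zero_testBit, PySem.Int.bitCount_zero]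
      · have hpos : 0 < N := Nat.pos_of_ne_zero h0
        rw [PySem.Int.bitCount_natCast hpos]
        have hdiv : N / 2 < 2 ^ fuel := by
          have : (2 : Nat) ^ (fuel + 1) = 2 * 2 ^ fuel := by rw [pow_succ]; ring
          omega
        rw [ih (N / 2) hdiv, Finset.sum_range_succ']
        have hbit0 : (N.testBit 0).toNat = N % 2 := by
          rw [Nat.testBit_zero]
          have : N % 2 = 0 ∨ N % 2 = 1 := by omega
          rcases this with h | h <;> simp [h]
        have hbits : ∀ i, (N.testBit (i + 1)).toNat = ((N / 2).testBit i).toNat := by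
          intro i; rw [Nat.testBit_add_one]
        simp only [hbits, hbit0]
        omega

-- ---- splitting a sum over 2K indices into K pairs ----

theorem pv_sum_pairs (f : Nat → Nat) (K : Nat) :
    ∑ j ∈ Finset.range (2 * K), f j = ∑ i ∈ Finset.range K, (f (2 * i) + f (2 * i + 1)) := by
  induction K with
  | zero => simp
  | succ K ih =>
      have h : 2 * (K + 1) = (2 * K + 1) + 1 := by omega
      rw [h, Finset.sum_range_succ, Finset.sum_range_succ, Finset.sum_range_succ, ih]
      omega

-- ===== VERDICT (the statement is the Claim_ definition above) =====
theorem jukes_cantor_spec : Claim_equal_jukes_cantor := by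
  intro w0 w1 m k _ hk
  unfold Spec_jukes_cantor
  set K := k.toNat with hKdef
  have h2k : (2 * k).toNat = 2 * K := by omega
  set n := 2 * K with hn
  -- names for the quantities shared by the two sides
  set full : Int := ((1 : Int) <<< (2 * k).toNat) - 1 with hfull
  have htbfull : ∀ i, full.testBit i = decide (i < n) := by
    intro i; rw [hfull, h2k, pv_tb_full]
  -- LOW and its bits
  have hLset : PySem.Int.floordiv full 3 = (((4 ^ K - 1 : Nat) / 3 : Nat) : Int) := by
    have h3L := pv_three_mul_L K
    rw [PySem.Int.floordiv_eq_iff_of_pos (by norm_num : (0:Int) < 3)]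
    have hfullval : full = (((4 ^ K - 1 : Nat) : Nat) : Int) := by
      rw [hfull, h2k]
      show ((1 <<< (2 * K) : Nat) : Int) - 1 = _
      rw [Nat.one_shiftLeft]
      have : (2 : Nat) ^ (2 * K) = 4 ^ K := by
        rw [pow_mul]; norm_num
      rw [this]
      have h1 : 1 ≤ (4 : Nat) ^ K := Nat.one_le_pow _ _ (by decide)
      push_cast [h1]
      ring
    rw [hfullval]
    have e := pv_three_mul_L K
    constructor <;> omega
  set L : Nat := (4 ^ K - 1) / 3 with hLdef
  have htbL : ∀ i, ((L : Nat) : Int).testBit i = (decide (i < n) && decide (i % 2 = 0)) := by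
    intro i; rw [pv_tb_natCast, pv_L_bits]
  -- the combined word of B
  set diff := PySem.Int.band (PySem.Int.bxor w0 w1) full with hdiff
  set dflag := PySem.Int.band (PySem.Int.bor diff (diff >>> (1 : Nat))) ((L : Nat) : Int) with hdflag
  set mm := PySem.Int.band m full with hmm
  set sel := PySem.Int.bxor (PySem.Int.band (PySem.Int.bor mm (mm >>> (1 : Nat))) ((L : Nat) : Int)) ((L : Nat) : Int) with hsel
  set word := PySem.Int.band dflag sel with hword
  have htbdiff : ∀ i, diff.testBit i = ((w0.testBit i ^^ w1.testBit i) && decide (i < n)) := by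
    intro i; rw [hdiff, pv_tb_band, pv_tb_bxor, htbfull]
  have htbmm : ∀ i, mm.testBit i = (m.testBit i && decide (i < n)) := by
    intro i; rw [hmm, pv_tb_band, htbfull]
  have htbword : ∀ i, word.testBit i =
      (decide (i < n) && decide (i % 2 = 0) &&
        ((w0.testBit i ^^ w1.testBit i) || (w0.testBit (i + 1) ^^ w1.testBit (i + 1))) &&
        (!(m.testBit i || m.testBit (i + 1)))) := by
    intro i
    simp only [hword, hdflag, hsel, pv_tb_band, pv_tb_bor, pv_tb_bxor, pv_tb_shiftRight,
      htbL, htbdiff, htbmm]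
    have e1 : 1 + i = i + 1 := by omega
    simp only [e1]
    by_cases h1 : i < n
    · by_cases h2 : i % 2 = 0
      · have h3 : i + 1 < n := by omega
        simp only [decide_eq_true h1, decide_eq_true h2, decide_eq_true h3]
        cases m.testBit i <;> cases m.testBit (i + 1) <;> cases w0.testBit i <;>
          cases w0.testBit (i + 1) <;> cases w1.testBit i <;> cases w1.testBit (i + 1) <;> rfl
      · have h2' : decide (i % 2 = 0) = false := decide_eq_false h2
        simp [h2']
    · have h1' : decide (i < n) = false := decide_eq_false h1
      have h3' : decide (i + 1 < n) = false := decide_eq_false (by omega)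
      simp [h1', h3']
  -- word is a nonnegative number below 2^n
  have hdflag_nn : (0 : Int) ≤ dflag := by
    rw [hdflag, PySem.Int.band_comm]
    exact PySem.Int.band_nonneg_of_nonneg_left _ (Int.natCast_nonneg _)
  have hwordnn : (0 : Int) ≤ word := by
    rw [hword]
    exact PySem.Int.band_nonneg_of_nonneg_left _ hdflag_nn
  set N := word.toNat with hN
  have hNcast : ((N : Nat) : Int) = word := Int.toNat_of_nonneg hwordnn
  have hNbit : ∀ i, N.testBit i = word.testBit i := by
    intro i; rw [← pv_tb_natCast N i, hNcast]
  have hNlt : N < 2 ^ n := by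
    have hmod : N % 2 ^ n = N := by
      apply Nat.eq_of_testBit_eq
      intro i
      rw [Nat.testBit_mod_two_pow]
      by_cases h : i < n
      · simp [h]
      · have : N.testBit i = false := by
          rw [hNbit, htbword]
          have : decide (i < n) = false := by simpa using h
          rw [this]; simp
        simp [h, this]
    have hpos : 0 < 2 ^ n := Nat.pow_pos (by decide : 0 < 2)
    omega
  -- B's value
  have hB : jukes_cantor_alt w0 w1 m k = ((∑ j ∈ Finset.range n, (N.testBit j).toNat : Nat) : Int) := by
    have hLraw : PySem.Int.floordiv (((1 : Int) <<< (2 * k).toNat) - 1) 3 = ((L : Nat) : Int) := hLset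
    have hstep : jukes_cantor_alt w0 w1 m k = ((PySem.Int.bitCount word : Nat) : Int) := by
      simp only [jukes_cantor_alt, hLraw]
      rfl
    rw [hstep, ← hNcast, pv_bitCount_sum n N hNlt]
  -- A's value
  have hA : jukes_cantor w0 w1 m k =
      0 + ∑ i ∈ Finset.range K,
        (if (pvIdx (PySem.Int.bxor m full) i = 3) ∧ ¬ (pvIdx w0 i = pvIdx w1 i) then (1 : Int) else 0) := by
    show (List.range K).foldl _ 0 = _
    exact pv_foldl_count (fun i => pvIdx (PySem.Int.bxor m full) i = 3)
      (fun i => pvIdx w0 i = pvIdx w1 i) K 0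
  rw [hA, hB, zero_add]
  -- turn B's sum over 2K bit positions into a sum over K groups
  rw [pv_sum_pairs]
  have hodd : ∀ i, i < K → (N.testBit (2 * i + 1)).toNat = 0 := by
    intro i hi
    rw [hNbit, htbword]
    have h2 : decide ((2 * i + 1) % 2 = 0) = false := by
      rw [decide_eq_false_iff_not]; omega
    rw [h2]
    simp
  have heven : ∀ i, i < K →
      (N.testBit (2 * i)).toNat =
        (if (pvIdx (PySem.Int.bxor m full) i = 3) ∧ ¬ (pvIdx w0 i = pvIdx w1 i) then (1 : Nat) else 0) := by
    intro i hi
    have h0 : 2 * i < n := by omega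
    have h1 : 2 * i + 1 < n := by omega
    have hd0 : (PySem.Int.bxor m full).testBit (2 * i) = !(m.testBit (2 * i)) := by
      rw [pv_tb_bxor, htbfull, decide_eq_true h0]
      cases m.testBit (2 * i) <;> rfl
    have hd1 : (PySem.Int.bxor m full).testBit (2 * i + 1) = !(m.testBit (2 * i + 1)) := by
      rw [pv_tb_bxor, htbfull, decide_eq_true h1]
      cases m.testBit (2 * i + 1) <;> rfl
    rw [hNbit, htbword]
    simp only [pv_idx_eq_three_iff, pv_idx_eq_iff, hd0, hd1]
    have e0 : decide (2 * i < n) = true := decide_eq_true h0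
    have e2 : decide ((2 * i) % 2 = 0) = true := by
      rw [decide_eq_true_iff]; omega
    rw [e0, e2]
    cases hm0 : m.testBit (2 * i) <;> cases hm1 : m.testBit (2 * i + 1) <;>
      cases hw00 : w0.testBit (2 * i) <;> cases hw01 : w0.testBit (2 * i + 1) <;>
        cases hw10 : w1.testBit (2 * i) <;> cases hw11 : w1.testBit (2 * i + 1) <;>
          simp
  have hsum2 : ∑ i ∈ Finset.range K, ((N.testBit (2 * i)).toNat + (N.testBit (2 * i + 1)).toNat)
      = ∑ i ∈ Finset.range K,
          (if (pvIdx (PySem.Int.bxor m full) i = 3) ∧ ¬ (pvIdx w0 i = pvIdx w1 i) then (1 : Nat) else 0) := by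
    apply Finset.sum_congr rfl
    intro i hi
    have hi' := Finset.mem_range.mp hi
    rw [heven i hi', hodd i hi']
    omega
  rw [hsum2, Nat.cast_sum]
  apply Finset.sum_congr rfl
  intro i _
  by_cases h : (pvIdx (PySem.Int.bxor m full) i = 3) ∧ ¬ (pvIdx w0 i = pvIdx w1 i) <;> simp [h]
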